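-- pv_equiv track=rewrite | github.com/georegehehe/NLPTool | absa.py | add_sentence
-- ===== SOURCE A (Python) =====
-- def add_sentence(head,lst, limit):
--     if not lst:
--         return ""
--     else:
--         if head:
--             if limit - len(lst[0]) < 0:
--                 return ""
--             else:
--                 return lst[0] + add_sentence(False,lst[1:], limit - len(lst[0]))
--         else:
--             if limit - len(lst[-1]) < 0:
--                 return ""
--             else:
--                 return add_sentence(True, lst[:-1], limit-len(lst[-1])) + lst[-1]
-- ===== SOURCE B (Python) =====
-- def add_sentence(head, lst, limit):
--     # Two-pointer iteration over the ends of lst (no slicing, no recursion),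
--     # collecting taken pieces into two lists joined once at the end.
--     i, j = 0, len(lst) - 1
--     h = head
--     front = []
--     back = []
--     while i <= j:
--         s = lst[i] if h else lst[j]
--         if len(s) > limit:
--             break
--         limit -= len(s)
--         if h:
--             front.append(s)
--             i += 1
--         else:
--             back.append(s)
--             j -= 1
--         h = not h
--     return "".join(front) + "".join(reversed(back))
-- ===== Notes on version B (the rewrite author's own statement) =====
-- stated objective: faster
-- what changed: Replaced the recursion that copies a slice of the list at every step with a two-pointer loop over indices that accumulates the taken pieces into two lists and joins them once at the end.
import Mathlib
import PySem

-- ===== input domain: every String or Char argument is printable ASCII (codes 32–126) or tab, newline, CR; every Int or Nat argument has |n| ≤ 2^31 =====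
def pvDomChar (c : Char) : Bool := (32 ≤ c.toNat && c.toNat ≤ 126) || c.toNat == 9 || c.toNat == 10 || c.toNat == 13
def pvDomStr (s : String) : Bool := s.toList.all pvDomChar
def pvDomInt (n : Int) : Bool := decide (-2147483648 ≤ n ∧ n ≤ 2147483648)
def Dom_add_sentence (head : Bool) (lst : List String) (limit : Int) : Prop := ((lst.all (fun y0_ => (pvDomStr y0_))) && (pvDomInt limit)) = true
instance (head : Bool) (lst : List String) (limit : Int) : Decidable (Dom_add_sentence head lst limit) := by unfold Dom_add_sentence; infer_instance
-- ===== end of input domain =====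

-- B replaces A's slicing recursion by a two-pointer index loop with two accumulators joined once (measured faster, asymptotic).


-- ===== PORT A =====
-- Literal transliteration of A: `lst[0]`/`lst[1:]` are the cons pattern, `lst[-1]` is getLast
-- and `lst[:-1]` is dropLast on the nonempty list (PySem.List.slice_to_neg_one), both exact here.
def add_sentence (head : Bool) (lst : List String) (limit : Int) : String :=
  match lst, head with
  | [], _ => ""
  | x :: rest, true =>
      if limit - PySem.Str.len x < 0 then ""
      else x ++ add_sentence false rest (limit - PySem.Str.len x)
  | x :: rest, false =>
      let s := (x :: rest).getLast (by simp)
      if limit - PySem.Str.len s < 0 then ""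
      else add_sentence true (x :: rest).dropLast (limit - PySem.Str.len s) ++ s
termination_by lst.length
decreasing_by
  · simp
  · simp [List.length_dropLast]

-- ===== PORT B =====
-- The while loop of Source B: i,j are Python ints; lst[i]/lst[j] are always in range while i ≤ j
-- (0 ≤ i, j < len is an invariant), so the total pyGetD form is exact.
def altLoop (lst : List String) (i j : Int) (h : Bool) (limit : Int)
    (front back : List String) : List String × List String :=
  if _hij : i ≤ j then
    let s := PySem.List.pyGetD lst (if h then i else j) ""
    if PySem.Str.len s > limit then (front, back)
    else if h then altLoop lst (i + 1) j false (limit - PySem.Str.len s) (front ++ [s]) back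
    else altLoop lst i (j - 1) true (limit - PySem.Str.len s) front (back ++ [s])
  else (front, back)
termination_by (j + 1 - i).toNat
decreasing_by all_goals omega

def add_sentence_alt (head : Bool) (lst : List String) (limit : Int) : String :=
  let p := altLoop lst 0 (PySem.List.len lst - 1) head limit [] []
  PySem.Str.join "" p.1 ++ PySem.Str.join "" p.2.reverse

-- ===== PRECONDITION & SPEC =====
def Spec_add_sentence (head : Bool) (lst : List String) (limit : Int) (out : String) : Prop := out = add_sentence_alt head lst limit
instance (head : Bool) (lst : List String) (limit : Int) (out : String) : Decidable (Spec_add_sentence head lst limit out) := by unfold Spec_add_sentence; infer_instance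

-- ===== CLAIM (what is proved, stated in full; the proofs are below) =====
def Claim_equal_add_sentence : Prop := ∀ (head : Bool) (lst : List String) (limit : Int), Dom_add_sentence head lst limit → Spec_add_sentence head lst limit (add_sentence head lst limit)

-- ===== LEMMAS AND PROOFS =====

theorem chars_join_nil (css : List (List Char)) : PySem.Chars.join [] css = css.flatten := by
  show [].intercalate _ = _
  induction css with
  | nil => simp [List.intercalate]
  | cons c cs ih => cases cs <;> simp_all [List.intercalate, List.intersperse]

theorem join_empty_nil : PySem.Str.join "" [] = "" := by
  apply String.toList_inj.mp; simp [PySem.Str.toList_join]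

theorem join_empty_snoc (parts : List String) (s : String) :
    PySem.Str.join "" (parts ++ [s]) = PySem.Str.join "" parts ++ s := by
  apply String.toList_inj.mp; simp [PySem.Str.toList_join, chars_join_nil]

theorem join_empty_cons (s : String) (parts : List String) :
    PySem.Str.join "" (s :: parts) = s ++ PySem.Str.join "" parts := by
  apply String.toList_inj.mp; simp [PySem.Str.toList_join, chars_join_nil]

-- unfolding equations for the A port
theorem add_sentence_nil (h : Bool) (limit : Int) : add_sentence h [] limit = "" := by
  rw [add_sentence]

theorem add_sentence_true (x : String) (rest : List String) (limit : Int) :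
    add_sentence true (x :: rest) limit =
      if limit - PySem.Str.len x < 0 then ""
      else x ++ add_sentence false rest (limit - PySem.Str.len x) := by
  rw [add_sentence]

theorem add_sentence_false (l : List String) (hne : l ≠ []) (limit : Int) :
    add_sentence false l limit =
      if limit - PySem.Str.len (l.getLast hne) < 0 then ""
      else add_sentence true l.dropLast (limit - PySem.Str.len (l.getLast hne)) ++ l.getLast hne := by
  cases l with
  | nil => exact absurd rfl hne
  | cons x rest => rw [add_sentence]

theorem take_drop_snoc {α : Type} (l : List α) (a b : Nat) (hab : a ≤ b) (h : b < l.length) :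
    (l.drop a).take (b - a + 1) = (l.drop a).take (b - a) ++ [l[b]] := by
  rw [List.take_add_one]
  have hib : a + (b - a) = b := by omega
  simp [List.getElem?_drop, hib, List.getElem?_eq_getElem h]

-- main loop invariant: running the loop from (i, j) and joining equals the already-taken
-- prefix/suffix around A's value on the remaining window lst[i..j]
theorem altLoop_eq (lst : List String) (i j : Int) (h : Bool) (limit : Int)
    (front back : List String) (hi : 0 ≤ i) (hj : j < lst.length) :
    PySem.Str.join "" (altLoop lst i j h limit front back).1
        ++ PySem.Str.join "" (altLoop lst i j h limit front back).2.reverse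
      = PySem.Str.join "" front
          ++ add_sentence h ((lst.drop i.toNat).take (j + 1 - i).toNat) limit
          ++ PySem.Str.join "" back.reverse := by
  by_cases hij : i ≤ j
  · have hjn : j.toNat < lst.length := by omega
    have hin : i.toNat ≤ j.toNat := by omega
    have hwin : (j + 1 - i).toNat = (j.toNat - i.toNat) + 1 := by omega
    have hsub : (lst.drop i.toNat).take (j + 1 - i).toNat
        = (lst.drop i.toNat).take (j.toNat - i.toNat) ++ [lst[j.toNat]] := by
      rw [hwin, take_drop_snoc lst i.toNat j.toNat (by omega) (by omega)]
    cases h with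
    | true =>
      rw [altLoop]
      rw [dif_pos hij]
      simp only [if_true]
      have hs : PySem.List.pyGetD lst i "" = lst[i.toNat] :=
        PySem.List.pyGetD_eq_getElem lst "" hi (by omega)
      have hcons : (lst.drop i.toNat).take (j + 1 - i).toNat
          = lst[i.toNat] :: ((lst.drop (i + 1).toNat).take (j + 1 - (i + 1)).toNat) := by
        have e1 : (i + 1).toNat = i.toNat + 1 := by omega
        have e2 : (j + 1 - (i + 1)).toNat = j.toNat - i.toNat := by omega
        rw [hwin, e1, e2, List.drop_eq_getElem_cons (show i.toNat < lst.length by omega),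
          List.take_succ_cons]
      rw [hcons, add_sentence_true]
      simp only [hs]
      by_cases hlim : PySem.Str.len lst[i.toNat] > limit
      · rw [if_pos hlim, if_pos (by omega)]
        simp
      · rw [if_neg hlim, if_neg (by omega)]
        rw [altLoop_eq lst (i + 1) j false (limit - PySem.Str.len lst[i.toNat])
              (front ++ [lst[i.toNat]]) back (by omega) hj]
        rw [join_empty_snoc]
        simp [String.append_assoc]
    | false =>
      rw [altLoop]
      rw [dif_pos hij]
      simp only [Bool.false_eq_true, if_false]
      have hs : PySem.List.pyGetD lst j "" = lst[j.toNat] :=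
        PySem.List.pyGetD_eq_getElem lst "" (by omega) (by omega)
      have hne : (lst.drop i.toNat).take (j + 1 - i).toNat ≠ [] := by
        rw [hsub]; simp
      rw [add_sentence_false _ hne]
      have hlast : ((lst.drop i.toNat).take (j + 1 - i).toNat).getLast hne = lst[j.toNat] := by
        simp [hsub]
      have hdrop : ((lst.drop i.toNat).take (j + 1 - i).toNat).dropLast
          = (lst.drop i.toNat).take (j + 1 - (i + 1)).toNat := by
        have e2 : (j + 1 - (i + 1)).toNat = j.toNat - i.toNat := by omega
        rw [hsub, List.dropLast_concat, e2]
      rw [hlast, hdrop]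
      simp only [hs]
      by_cases hlim : PySem.Str.len lst[j.toNat] > limit
      · rw [if_pos hlim, if_pos (by omega)]
        simp
      · rw [if_neg hlim, if_neg (by omega)]
        rw [altLoop_eq lst i (j - 1) true (limit - PySem.Str.len lst[j.toNat])
              front (back ++ [lst[j.toNat]]) hi (by omega)]
        have hw : (j - 1 + 1 - i).toNat = (j + 1 - (i + 1)).toNat := by omega
        rw [hw, List.reverse_append, List.reverse_singleton, List.singleton_append,
          join_empty_cons]
        simp [String.append_assoc]
  · rw [altLoop]
    simp only [hij, dite_false]
    have : (j + 1 - i).toNat = 0 := by omega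
    rw [this]
    simp [add_sentence_nil]
termination_by (j + 1 - i).toNat
decreasing_by all_goals omega

-- ===== VERDICT (by name: the statement is the Claim_ definition above) =====
theorem add_sentence_spec : Claim_equal_add_sentence := by
  intro head lst limit _
  show add_sentence head lst limit = add_sentence_alt head lst limit
  unfold add_sentence_alt
  show add_sentence head lst limit
      = PySem.Str.join "" (altLoop lst 0 (PySem.List.len lst - 1) head limit [] []).1
          ++ PySem.Str.join "" (altLoop lst 0 (PySem.List.len lst - 1) head limit [] []).2.reverse
  rw [altLoop_eq lst 0 (PySem.List.len lst - 1) head limit [] [] le_rfl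
        (by simp only [PySem.List.len_eq]; omega)]
  have : ((PySem.List.len lst - 1) + 1 - 0).toNat = lst.length := by
    simp only [PySem.List.len_eq]; omega
  rw [this]
  simp [join_empty_nil]
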